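-- pv_equiv track=rewrite | github.com/miniddo/Algorithm | 백준_알고리즘/구현/14500_테트로미노.py | type1
-- ===== SOURCE A (Python) =====
-- def rotate_90(n, m, matrix):
--     result = []
--     for i in range(m):
--         ret = []
--         for j in range(n-1, -1, -1):
--             ret.append(matrix[j][i])
--         result.append(ret)
--     return result
--
-- def symmetry(n, m, matrix):
--     result = []
--     for i in range(n):
--         ret = []
--         for j in range(m-1, -1, -1):
--             ret.append(matrix[i][j])
--         result.append(ret)
--     return result
--
-- def type1(n, m, matrix):
--
--     count = 0
--
--     # 기본
--     for i in range(n):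
--         for j in range(m):
--             if j+3 >= m: break
--             if matrix[i][j] + matrix[i][j+1] + matrix[i][j+2] + matrix[i][j+3] > count:
--                 count =  matrix[i][j] + matrix[i][j+1] + matrix[i][j+2] + matrix[i][j+3]
--
--     # 90도 회전
--     matrix_90 = rotate_90(n, m, matrix)
--     for i in range(len(matrix_90)):
--         for j in range(len(matrix_90[0])):
--             if j+3 >= len(matrix_90[0]): break
--             if matrix_90[i][j] + matrix_90[i][j+1] + matrix_90[i][j+2] + matrix_90[i][j+3] > count:
--                 count =  matrix_90[i][j] + matrix_90[i][j+1] + matrix_90[i][j+2] + matrix_90[i][j+3]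
--
--     matrix = symmetry(n, m, matrix)
--     # 기본 + 대칭
--     for i in range(n):
--         for j in range(m):
--             if j+3 >= m: break
--             if matrix[i][j] + matrix[i][j+1] + matrix[i][j+2] + matrix[i][j+3] > count:
--                 count =  matrix[i][j] + matrix[i][j+1] + matrix[i][j+2] + matrix[i][j+3]
--
--     # 90도 회전 + 대칭
--     matrix_90_sym = rotate_90(n, m, matrix)
--     for i in range(len(matrix_90_sym)):
--         for j in range(len(matrix_90_sym[0])):
--             if j+3 >= len(matrix_90_sym[0]): break
--             if matrix_90_sym[i][j] + matrix_90_sym[i][j+1] + matrix_90_sym[i][j+2] + matrix_90_sym[i][j+3] > count: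
--                 count =  matrix_90_sym[i][j] + matrix_90_sym[i][j+1] + matrix_90_sym[i][j+2] + matrix_90_sym[i][j+3]
--
--     return count
-- ===== SOURCE B (Python) =====
-- def type1(n, m, matrix):
--     if n <= 0 or m <= 0:
--         return 0
--     best = 0
--     # horizontal 4-windows via row prefix sums
--     for i in range(n):
--         row = matrix[i]
--         pre = [0]
--         acc = 0
--         for j in range(m):
--             acc += row[j]
--             pre.append(acc)
--         for j in range(m - 3):
--             s = pre[j + 4] - pre[j]
--             if s > best:
--                 best = s
--     # vertical 4-windows via column prefix sums
--     for j in range(m):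
--         pre = [0]
--         acc = 0
--         for i in range(n):
--             acc += matrix[i][j]
--             pre.append(acc)
--         for i in range(n - 3):
--             s = pre[i + 4] - pre[i]
--             if s > best:
--                 best = s
--     return best
-- ===== Notes on version B (the rewrite author's own statement) =====
-- stated objective: simpler
-- what changed: B drops A's four rotate/mirror matrix copies and redundant mirrored passes, computing the best horizontal and vertical 4-window directly from per-row and per-column prefix sums in one pass each.
import Mathlib
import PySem

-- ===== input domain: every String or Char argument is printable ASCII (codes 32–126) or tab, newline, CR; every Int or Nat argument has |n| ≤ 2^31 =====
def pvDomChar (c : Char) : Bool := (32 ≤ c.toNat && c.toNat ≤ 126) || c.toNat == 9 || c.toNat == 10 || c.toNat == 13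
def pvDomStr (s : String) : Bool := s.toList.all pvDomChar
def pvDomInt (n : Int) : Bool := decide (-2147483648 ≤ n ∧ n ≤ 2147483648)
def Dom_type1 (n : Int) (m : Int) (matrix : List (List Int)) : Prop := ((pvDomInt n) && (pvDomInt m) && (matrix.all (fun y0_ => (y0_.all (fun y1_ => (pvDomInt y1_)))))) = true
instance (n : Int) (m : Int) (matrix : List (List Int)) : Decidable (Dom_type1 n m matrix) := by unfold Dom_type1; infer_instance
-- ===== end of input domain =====

-- B replaces A's four rotate/mirror scanning passes by one prefix-sum pass per row and per column
-- (horizontal and vertical 4-windows once each); equivalence is about the return value only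
-- (A rebinds only a local name, neither program mutates the caller's matrix).

-- ===== PORT A =====
-- matrix[i][j] on in-range indices (Pre_ guarantees in range wherever Python evaluates it)
def pvCell (matrix : List (List Int)) (i j : Int) : Int :=
  PySem.List.pyGetD (PySem.List.pyGetD matrix i []) j 0

def rotate_90 (n m : Int) (matrix : List (List Int)) : List (List Int) :=
  (PySem.List.pyRange 0 m 1).foldl (fun result i =>
    result ++ [(PySem.List.pyRange (n-1) (-1) (-1)).foldl
      (fun ret j => ret ++ [pvCell matrix j i]) []]) []

def symmetry (n m : Int) (matrix : List (List Int)) : List (List Int) :=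
  (PySem.List.pyRange 0 n 1).foldl (fun result i =>
    result ++ [(PySem.List.pyRange (m-1) (-1) (-1)).foldl
      (fun ret j => ret ++ [pvCell matrix i j]) []]) []

-- inner 'for j in range(cols): if j+3 >= cols: break; …' of one of A's four passes
def pvRowScanA (matrix : List (List Int)) (i cols : Int) (js : List Int) (count : Int) : Int :=
  match js with
  | [] => count
  | j :: rest =>
    if j + 3 ≥ cols then count
    else
      let s := pvCell matrix i j + pvCell matrix i (j+1) + pvCell matrix i (j+2) + pvCell matrix i (j+3)
      pvRowScanA matrix i cols rest (if s > count then s else count)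

-- one of A's four 'for i in range(rows): …' passes
def pvPassA (matrix : List (List Int)) (rows cols : Int) (count : Int) : Int :=
  (PySem.List.pyRange 0 rows 1).foldl
    (fun c i => pvRowScanA matrix i cols (PySem.List.pyRange 0 cols 1) c) count

def type1 (n : Int) (m : Int) (matrix : List (List Int)) : Int :=
  let c1 := pvPassA matrix n m 0
  let m90 := rotate_90 n m matrix
  let c2 := pvPassA m90 (PySem.List.len m90) (PySem.List.len (PySem.List.pyGetD m90 0 [])) c1
  let msym := symmetry n m matrix
  let c3 := pvPassA msym n m c2
  let m90s := rotate_90 n m msym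
  let c4 := pvPassA m90s (PySem.List.len m90s) (PySem.List.len (PySem.List.pyGetD m90s 0 [])) c3
  c4

-- ===== PORT B =====
def type1_alt (n : Int) (m : Int) (matrix : List (List Int)) : Int :=
  if n ≤ 0 ∨ m ≤ 0 then 0
  else
    -- horizontal 4-windows via row prefix sums
    let best1 := (PySem.List.pyRange 0 n 1).foldl (fun best i =>
      let row := PySem.List.pyGetD matrix i []
      let pa := (PySem.List.pyRange 0 m 1).foldl
        (fun pa j => (pa.1 ++ [pa.2 + PySem.List.pyGetD row j 0], pa.2 + PySem.List.pyGetD row j 0))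
        ([(0:Int)], (0:Int))
      (PySem.List.pyRange 0 (m-3) 1).foldl (fun b j =>
        let s := PySem.List.pyGetD pa.1 (j+4) 0 - PySem.List.pyGetD pa.1 j 0
        if s > b then s else b) best) 0
    -- vertical 4-windows via column prefix sums
    (PySem.List.pyRange 0 m 1).foldl (fun best j =>
      let pa := (PySem.List.pyRange 0 n 1).foldl
        (fun pa i => (pa.1 ++ [pa.2 + PySem.List.pyGetD (PySem.List.pyGetD matrix i []) j 0],
                      pa.2 + PySem.List.pyGetD (PySem.List.pyGetD matrix i []) j 0))
        ([(0:Int)], (0:Int))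
      (PySem.List.pyRange 0 (n-3) 1).foldl (fun b i =>
        let s := PySem.List.pyGetD pa.1 (i+4) 0 - PySem.List.pyGetD pa.1 i 0
        if s > b then s else b) best) best1

-- ===== PRECONDITION & SPEC =====
-- Exactly where Python's A returns (elsewhere it raises IndexError): when both dimensions are
-- positive, the matrix must have at least n rows and each of its first n rows at least m entries.
def Pre_type1 (n : Int) (m : Int) (matrix : List (List Int)) : Prop :=
  n ≤ 0 ∨ m ≤ 0 ∨ (n ≤ matrix.length ∧ ∀ row ∈ matrix.take n.toNat, m ≤ row.length)
instance (n : Int) (m : Int) (matrix : List (List Int)) : Decidable (Pre_type1 n m matrix) := by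
  unfold Pre_type1; infer_instance

def pvWitness_type1 : Int × Int × List (List Int) :=
  (2, 4, [[1, 2, 3, 4], [5, -6, 7, 8]])

def Spec_type1 (n : Int) (m : Int) (matrix : List (List Int)) (out : Int) : Prop := out = type1_alt n m matrix
instance (n : Int) (m : Int) (matrix : List (List Int)) (out : Int) : Decidable (Spec_type1 n m matrix out) := by unfold Spec_type1; infer_instance

-- ===== CLAIM (what is proved, stated in full; the proofs are below) =====
def Claim_equal_type1 : Prop := ∀ (n : Int) (m : Int) (matrix : List (List Int)), Dom_type1 n m matrix → Pre_type1 n m matrix → Spec_type1 n m matrix (type1 n m matrix)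

-- ===== LEMMAS AND PROOFS =====

-- horizontal 4-window sum of M at row i, columns j..j+3
def pvW (M : List (List Int)) (i j : Int) : Int :=
  pvCell M i j + pvCell M i (j+1) + pvCell M i (j+2) + pvCell M i (j+3)

-- vertical 4-window sum of M at column j, rows i..i+3
def pvV (M : List (List Int)) (i j : Int) : Int :=
  pvCell M i j + pvCell M (i+1) j + pvCell M (i+2) j + pvCell M (i+3) j

-- the list of horizontal window sums one of A's scanning passes maximises over
def pvHL (M : List (List Int)) (rows cols : Int) : List Int :=
  (PySem.List.pyRange 0 rows 1).flatMap (fun i => (PySem.List.pyRange 0 (cols-3) 1).map (fun j => pvW M i j))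

-- the list of vertical window sums B's column pass maximises over
def pvVL (M : List (List Int)) (n m : Int) : List Int :=
  (PySem.List.pyRange 0 m 1).flatMap (fun j => (PySem.List.pyRange 0 (n-3) 1).map (fun i => pvV M i j))

-- prefix sums of f 0, f 1, …
def pvPre (f : Int → Int) : Nat → Int
  | 0 => 0
  | k+1 => pvPre f k + f k

theorem pv_if_max (c s : Int) : (if s > c then s else c) = max c s := by
  rcases lt_or_ge c s with h | h <;> simp [max_def] <;> omega

theorem pv_foldl_max_flatMap {α : Type} (l : List α) (g : α → List Int) (c : Int) :
    l.foldl (fun c x => (g x).foldl max c) c = (l.flatMap g).foldl max c := by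
  induction l generalizing c with
  | nil => rfl
  | cons x t ih => simp [List.flatMap_cons, List.foldl_append, ih]

theorem pv_foldl_max_le (l : List Int) (c b : Int) (hc : c ≤ b) (h : ∀ x ∈ l, x ≤ b) :
    l.foldl max c ≤ b := by
  induction l generalizing c with
  | nil => exact hc
  | cons x t ih =>
    exact ih (max c x) (max_le hc (h x (by simp))) (fun y hy => h y (by simp [hy]))

theorem pv_foldl_max_eq_of_mem (l1 l2 : List Int) (h : ∀ x, x ∈ l1 ↔ x ∈ l2) :
    l1.foldl max 0 = l2.foldl max 0 := by
  apply le_antisymm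
  · exact pv_foldl_max_le _ _ _ (PySem.List.le_foldl_max l2 0).1
      (fun x hx => (PySem.List.le_foldl_max l2 0).2 x ((h x).1 hx))
  · exact pv_foldl_max_le _ _ _ (PySem.List.le_foldl_max l1 0).1
      (fun x hx => (PySem.List.le_foldl_max l1 0).2 x ((h x).2 hx))

theorem pvRowScanA_eq_aux (M : List (List Int)) (cols : Int) :
    ∀ (k : Nat) (a i c : Int), (cols - a).toNat = k →
      pvRowScanA M i cols (PySem.List.pyRange a cols 1) c
        = ((PySem.List.pyRange a (cols-3) 1).map (pvW M i)).foldl max c := by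
  intro k
  induction k with
  | zero =>
    intro a i c hk
    rw [PySem.List.pyRange_one_eq_nil (by omega), PySem.List.pyRange_one_eq_nil (by omega)]
    rfl
  | succ k ih =>
    intro a i c hk
    rw [PySem.List.pyRange_one_cons (by omega)]
    by_cases h3 : a + 3 ≥ cols
    · rw [show PySem.List.pyRange a (cols-3) 1 = [] from PySem.List.pyRange_one_eq_nil (by omega)]
      simp [pvRowScanA, h3]
    · rw [PySem.List.pyRange_one_cons (by omega : a < cols - 3)]
      simp only [pvRowScanA, h3, if_false, List.map_cons, List.foldl_cons]
      rw [ih (a+1) i _ (by omega), pv_if_max]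
      rfl

theorem pvRowScanA_eq (M : List (List Int)) (cols i c : Int) :
    pvRowScanA M i cols (PySem.List.pyRange 0 cols 1) c
      = ((PySem.List.pyRange 0 (cols-3) 1).map (fun j => pvW M i j)).foldl max c :=
  pvRowScanA_eq_aux M cols (cols - 0).toNat 0 i c rfl

theorem pvPassA_eq (M : List (List Int)) (rows cols : Int) (c : Int) :
    pvPassA M rows cols c = (pvHL M rows cols).foldl max c := by
  unfold pvPassA pvHL
  simp only [pvRowScanA_eq]
  exact pv_foldl_max_flatMap _ _ _

theorem pv_build (f : Int → Int) (M : Nat) :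
    (PySem.List.pyRange 0 (M:Int) 1).foldl
      (fun pa t => (pa.1 ++ [pa.2 + f t], pa.2 + f t)) ([(0:Int)],(0:Int))
    = ((List.range (M+1)).map (fun k => pvPre f k), pvPre f M) := by
  induction M with
  | zero =>
    rw [PySem.List.pyRange_one_eq_nil (by omega)]
    simp [pvPre]
  | succ M ih =>
    rw [show ((M+1:Nat):Int) = (M:Int)+1 by push_cast; ring,
        PySem.List.pyRange_one_succ_right (by positivity), List.foldl_append, ih]
    simp only [List.foldl_cons, List.foldl_nil]
    rw [Prod.mk.injEq]
    refine ⟨?_, ?_⟩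
    · conv_rhs => rw [List.range_succ, List.map_append]
      simp [pvPre]
    · simp [pvPre]

theorem pv_getP (f : Int → Int) (M : Nat) (t : Int) (h0 : 0 ≤ t) (h : t < (M:Int)+1) :
    PySem.List.pyGetD ((List.range (M+1)).map (fun k => pvPre f k)) t 0 = pvPre f t.toNat := by
  rw [PySem.List.pyGetD_eq_getElem _ 0 h0 (by simp; omega)]
  rw [List.getElem_map, List.getElem_range]

theorem pv_window (f : Int → Int) (k : Nat) :
    pvPre f (k+4) - pvPre f k = f k + f ((k:Int)+1) + f ((k:Int)+2) + f ((k:Int)+3) := by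
  show pvPre f (k+3+1) - pvPre f k = _
  simp only [pvPre]
  push_cast
  ring

theorem pv_inner (f : Int → Int) (M : Nat) (c : Int) (hc : c + 3 ≤ (M:Int)) (best : Int) :
    (PySem.List.pyRange 0 c 1).foldl (fun b t =>
       if PySem.List.pyGetD ((List.range (M+1)).map (fun k => pvPre f k)) (t+4) 0
          - PySem.List.pyGetD ((List.range (M+1)).map (fun k => pvPre f k)) t 0 > b
       then PySem.List.pyGetD ((List.range (M+1)).map (fun k => pvPre f k)) (t+4) 0
          - PySem.List.pyGetD ((List.range (M+1)).map (fun k => pvPre f k)) t 0 else b) best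
    = ((PySem.List.pyRange 0 c 1).map (fun t => f t + f (t+1) + f (t+2) + f (t+3))).foldl max best := by
  rw [List.foldl_map]
  apply PySem.List.foldl_congr_mem
  intro b t ht
  have hb := PySem.List.mem_pyRange_one.1 ht
  have h4 : (t+4).toNat = t.toNat + 4 := by omega
  have ht' : (t.toNat : Int) = t := by omega
  rw [pv_getP f M (t+4) (by omega) (by omega), pv_getP f M t (by omega) (by omega), h4,
      pv_window, ht', pv_if_max]

theorem rotate_90_eq (n m : Int) (M : List (List Int)) :
    rotate_90 n m M = (PySem.List.pyRange 0 m 1).map (fun i =>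
      (PySem.List.pyRange (n-1) (-1) (-1)).map (fun j => pvCell M j i)) := by
  unfold rotate_90
  simp only [PySem.List.foldl_append_singleton_eq_map, List.nil_append]

theorem symmetry_eq (n m : Int) (M : List (List Int)) :
    symmetry n m M = (PySem.List.pyRange 0 n 1).map (fun i =>
      (PySem.List.pyRange (m-1) (-1) (-1)).map (fun j => pvCell M i j)) := by
  unfold symmetry
  simp only [PySem.List.foldl_append_singleton_eq_map, List.nil_append]

theorem cell_rotate (n m : Int) (M : List (List Int)) (i' j' : Int)
    (hi : 0 ≤ i') (hi2 : i' < m) (hj : 0 ≤ j') (hj2 : j' < n) :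
    pvCell (rotate_90 n m M) i' j' = pvCell M (n-1-j') i' := by
  rw [rotate_90_eq]
  show PySem.List.pyGetD (PySem.List.pyGetD _ i' []) j' 0 = _
  rw [PySem.List.pyGetD_map_pyRange_of_nonneg _ m i' [] hi hi2]
  rw [PySem.List.pyRange_neg_one, List.map_map]
  rw [PySem.List.pyGetD_eq_getElem _ 0 hj (by simp; omega)]
  simp only [List.getElem_map, List.getElem_range, Function.comp_apply]
  rw [show n - 1 - (j'.toNat : Int) = n - 1 - j' by omega]

theorem cell_symmetry (n m : Int) (M : List (List Int)) (i j : Int)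
    (hi : 0 ≤ i) (hi2 : i < n) (hj : 0 ≤ j) (hj2 : j < m) :
    pvCell (symmetry n m M) i j = pvCell M i (m-1-j) := by
  rw [symmetry_eq]
  show PySem.List.pyGetD (PySem.List.pyGetD _ i []) j 0 = _
  rw [PySem.List.pyGetD_map_pyRange_of_nonneg _ n i [] hi hi2]
  rw [PySem.List.pyRange_neg_one, List.map_map]
  rw [PySem.List.pyGetD_eq_getElem _ 0 hj (by simp; omega)]
  simp only [List.getElem_map, List.getElem_range, Function.comp_apply]
  rw [show m - 1 - (j.toNat : Int) = m - 1 - j by omega]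

theorem len_rotate (n m : Int) (M : List (List Int)) :
    PySem.List.len (rotate_90 n m M) = ((m - 0).toNat : Int) := by
  rw [rotate_90_eq, PySem.List.len_eq]
  simp [PySem.List.length_pyRange_one]

theorem row0_rotate_len (n m : Int) (M : List (List Int)) (hm : 0 < m) :
    (PySem.List.pyGetD (rotate_90 n m M) 0 []).length = n.toNat := by
  rw [rotate_90_eq, PySem.List.pyGetD_map_pyRange_of_nonneg _ m 0 [] le_rfl hm]
  simp [PySem.List.length_pyRange_neg_one]

theorem pvHL_nil (M : List (List Int)) (rows cols : Int) (h : rows ≤ 0 ∨ cols ≤ 3) :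
    pvHL M rows cols = [] := by
  unfold pvHL
  rcases h with h | h
  · rw [show PySem.List.pyRange 0 rows 1 = [] from PySem.List.pyRange_one_eq_nil (by omega)]
    simp
  · rw [show PySem.List.pyRange 0 (cols-3) 1 = [] from PySem.List.pyRange_one_eq_nil (by omega)]
    simp
theorem pv_inner' (f : Int → Int) (M : Nat) (best : Int) :
    (PySem.List.pyRange 0 ((M:Int)-3) 1).foldl (fun b t =>
       if PySem.List.pyGetD ((List.range (M+1)).map (fun k => pvPre f k)) (t+4) 0
          - PySem.List.pyGetD ((List.range (M+1)).map (fun k => pvPre f k)) t 0 > b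
       then PySem.List.pyGetD ((List.range (M+1)).map (fun k => pvPre f k)) (t+4) 0
          - PySem.List.pyGetD ((List.range (M+1)).map (fun k => pvPre f k)) t 0 else b) best
    = ((PySem.List.pyRange 0 ((M:Int)-3) 1).map (fun t => f t + f (t+1) + f (t+2) + f (t+3))).foldl max best :=
  pv_inner f M ((M:Int)-3) (by omega) best

theorem pv_alt_eq (n m : Int) (matrix : List (List Int)) (hn : 0 < n) (hm : 0 < m) :
    type1_alt n m matrix = ((pvHL matrix n m ++ pvVL matrix n m).foldl max 0) := by
  obtain ⟨M, rfl⟩ : ∃ M:Nat, m = ↑M := ⟨m.toNat, by omega⟩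
  obtain ⟨N, rfl⟩ : ∃ N:Nat, n = ↑N := ⟨n.toNat, by omega⟩
  unfold type1_alt
  rw [if_neg (by omega)]
  dsimp only [letFun]
  rw [List.foldl_append]
  simp only [pvHL, pvVL]
  rw [← pv_foldl_max_flatMap, ← pv_foldl_max_flatMap]
  simp only [pv_build, pv_inner', pvW, pvV, pvCell]

theorem pv_type1_eq (n m : Int) (matrix : List (List Int)) :
    type1 n m matrix =
      (pvHL matrix n m
        ++ pvHL (rotate_90 n m matrix) (PySem.List.len (rotate_90 n m matrix))
             (PySem.List.len (PySem.List.pyGetD (rotate_90 n m matrix) 0 []))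
        ++ pvHL (symmetry n m matrix) n m
        ++ pvHL (rotate_90 n m (symmetry n m matrix))
             (PySem.List.len (rotate_90 n m (symmetry n m matrix)))
             (PySem.List.len (PySem.List.pyGetD (rotate_90 n m (symmetry n m matrix)) 0 []))).foldl max 0 := by
  unfold type1
  simp only [pvPassA_eq, List.foldl_append]

theorem pv_mem_HL (M : List (List Int)) (rows cols x : Int) :
    x ∈ pvHL M rows cols ↔ ∃ i j, 0 ≤ i ∧ i < rows ∧ 0 ≤ j ∧ j < cols - 3 ∧ pvW M i j = x := by
  simp only [pvHL, List.mem_flatMap, List.mem_map, PySem.List.mem_pyRange_one]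
  constructor
  · rintro ⟨i, ⟨hi1, hi2⟩, j, ⟨hj1, hj2⟩, hx⟩
    exact ⟨i, j, hi1, hi2, hj1, hj2, hx⟩
  · rintro ⟨i, j, hi1, hi2, hj1, hj2, hx⟩
    exact ⟨i, ⟨hi1, hi2⟩, j, ⟨hj1, hj2⟩, hx⟩

theorem pv_mem_VL (M : List (List Int)) (n m x : Int) :
    x ∈ pvVL M n m ↔ ∃ i j, 0 ≤ i ∧ i < n - 3 ∧ 0 ≤ j ∧ j < m ∧ pvV M i j = x := by
  simp only [pvVL, List.mem_flatMap, List.mem_map, PySem.List.mem_pyRange_one]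
  constructor
  · rintro ⟨j, ⟨hj1, hj2⟩, i, ⟨hi1, hi2⟩, hx⟩
    exact ⟨i, j, hi1, hi2, hj1, hj2, hx⟩
  · rintro ⟨i, j, hi1, hi2, hj1, hj2, hx⟩
    exact ⟨j, ⟨hj1, hj2⟩, i, ⟨hi1, hi2⟩, hx⟩

theorem pvW_rotate (n m : Int) (M : List (List Int)) (i' j' : Int)
    (hi : 0 ≤ i') (hi2 : i' < m) (hj : 0 ≤ j') (hj2 : j' < n - 3) :
    pvW (rotate_90 n m M) i' j' = pvV M (n-4-j') i' := by
  unfold pvW pvV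
  rw [cell_rotate n m M i' j' hi hi2 (by omega) (by omega),
      cell_rotate n m M i' (j'+1) hi hi2 (by omega) (by omega),
      cell_rotate n m M i' (j'+2) hi hi2 (by omega) (by omega),
      cell_rotate n m M i' (j'+3) hi hi2 (by omega) (by omega),
      show n-1-j' = n-4-j'+3 by ring, show n-1-(j'+1) = n-4-j'+2 by ring,
      show n-1-(j'+2) = n-4-j'+1 by ring, show n-1-(j'+3) = n-4-j' by ring]
  ring

theorem pvW_symmetry (n m : Int) (M : List (List Int)) (i j : Int)
    (hi : 0 ≤ i) (hi2 : i < n) (hj : 0 ≤ j) (hj2 : j < m - 3) :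
    pvW (symmetry n m M) i j = pvW M i (m-4-j) := by
  unfold pvW
  rw [cell_symmetry n m M i j hi hi2 (by omega) (by omega),
      cell_symmetry n m M i (j+1) hi hi2 (by omega) (by omega),
      cell_symmetry n m M i (j+2) hi hi2 (by omega) (by omega),
      cell_symmetry n m M i (j+3) hi hi2 (by omega) (by omega),
      show m-1-j = m-4-j+3 by ring, show m-1-(j+1) = m-4-j+2 by ring,
      show m-1-(j+2) = m-4-j+1 by ring, show m-1-(j+3) = m-4-j by ring]
  ring

theorem pvW_rotate_symmetry (n m : Int) (M : List (List Int)) (i' j' : Int)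
    (hi : 0 ≤ i') (hi2 : i' < m) (hj : 0 ≤ j') (hj2 : j' < n - 3) :
    pvW (rotate_90 n m (symmetry n m M)) i' j' = pvV M (n-4-j') (m-1-i') := by
  rw [pvW_rotate n m _ i' j' hi hi2 hj hj2]
  unfold pvV
  rw [cell_symmetry n m M (n-4-j') i' (by omega) (by omega) hi hi2,
      cell_symmetry n m M (n-4-j'+1) i' (by omega) (by omega) hi hi2,
      cell_symmetry n m M (n-4-j'+2) i' (by omega) (by omega) hi hi2,
      cell_symmetry n m M (n-4-j'+3) i' (by omega) (by omega) hi hi2]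

theorem pv_row0_len_zero (n m : Int) (M : List (List Int)) (hn : n ≤ 0) :
    PySem.List.len (PySem.List.pyGetD (rotate_90 n m M) 0 []) ≤ 3 := by
  by_cases hm : 0 < m
  · rw [PySem.List.len_eq, row0_rotate_len n m M hm]
    omega
  · rw [rotate_90_eq, PySem.List.pyRange_one_eq_nil (by omega)]
    simp [PySem.List.pyGetD]

-- ===== VERDICT (by name: the statement is the Claim_ definition above) =====
theorem type1_spec : Claim_equal_type1 := by
  intro n m matrix _ _
  unfold Spec_type1
  by_cases hd : n ≤ 0 ∨ m ≤ 0
  · have halt : type1_alt n m matrix = 0 := by unfold type1_alt; rw [if_pos hd]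
    rw [halt, pv_type1_eq]
    rcases hd with h | h
    · rw [pvHL_nil matrix n m (Or.inl h), pvHL_nil (symmetry n m matrix) n m (Or.inl h),
          pvHL_nil _ _ _ (Or.inr (pv_row0_len_zero n m matrix h)),
          pvHL_nil _ _ _ (Or.inr (pv_row0_len_zero n m (symmetry n m matrix) h))]
      rfl
    · rw [pvHL_nil matrix n m (Or.inr (by omega)), pvHL_nil (symmetry n m matrix) n m (Or.inr (by omega)),
          pvHL_nil _ _ _ (Or.inl (by rw [len_rotate]; omega)),
          pvHL_nil _ _ _ (Or.inl (by rw [len_rotate]; omega))]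
      rfl
  · have hn : 0 < n := by omega
    have hm : 0 < m := by omega
    rw [pv_alt_eq n m matrix hn hm, pv_type1_eq]
    have h1 : PySem.List.len (rotate_90 n m matrix) = m := by rw [len_rotate]; omega
    have h2 : PySem.List.len (PySem.List.pyGetD (rotate_90 n m matrix) 0 []) = n := by
      rw [PySem.List.len_eq, row0_rotate_len n m matrix hm]; omega
    have h3 : PySem.List.len (rotate_90 n m (symmetry n m matrix)) = m := by rw [len_rotate]; omega
    have h4 : PySem.List.len (PySem.List.pyGetD (rotate_90 n m (symmetry n m matrix)) 0 []) = n := by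
      rw [PySem.List.len_eq, row0_rotate_len n m _ hm]; omega
    rw [h1, h2, h3, h4]
    apply pv_foldl_max_eq_of_mem
    intro x
    simp only [List.mem_append, pv_mem_HL, pv_mem_VL]
    constructor
    · rintro (((⟨i, j, hi1, hi2, hj1, hj2, hx⟩ | ⟨i, j, hi1, hi2, hj1, hj2, hx⟩)
            | ⟨i, j, hi1, hi2, hj1, hj2, hx⟩) | ⟨i, j, hi1, hi2, hj1, hj2, hx⟩)
      · exact Or.inl ⟨i, j, hi1, hi2, hj1, hj2, hx⟩
      · refine Or.inr ⟨n-4-j, i, by omega, by omega, by omega, by omega, ?_⟩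
        rw [← pvW_rotate n m matrix i j hi1 hi2 hj1 hj2, hx]
      · refine Or.inl ⟨i, m-4-j, by omega, by omega, by omega, by omega, ?_⟩
        rw [← pvW_symmetry n m matrix i j hi1 hi2 hj1 hj2, hx]
      · refine Or.inr ⟨n-4-j, m-1-i, by omega, by omega, by omega, by omega, ?_⟩
        rw [← pvW_rotate_symmetry n m matrix i j hi1 hi2 hj1 hj2, hx]
    · rintro (⟨i, j, hi1, hi2, hj1, hj2, hx⟩ | ⟨i, j, hi1, hi2, hj1, hj2, hx⟩)
      · exact Or.inl (Or.inl (Or.inl ⟨i, j, hi1, hi2, hj1, hj2, hx⟩))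
      · refine Or.inl (Or.inl (Or.inr ⟨j, n-4-i, by omega, by omega, by omega, by omega, ?_⟩))
        rw [pvW_rotate n m matrix j (n-4-i) (by omega) (by omega) (by omega) (by omega),
            show n-4-(n-4-i) = i by ring, hx]
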